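-- pv_equiv track=rewrite | github.com/olevineCloudSouth/SwitchBackupWithWebGUI | backendFlask/flask_endpoints/check_config.py | check_changes
-- ===== SOURCE A (Python) =====
-- def check_changes(formatted_diff):
--     sections = [[]]  # Initialize sections with an empty list
--     i = 0
--     for line in formatted_diff:
--         if line.startswith('@@'):
--             i += 1
--             sections.append([])  # Append a new empty list for the next section
--         sections[i].append(line)
--
--     # Remove sections that don't contain 'del' or 'add'
--     sections_to_remove = []
--     for idx, section in enumerate(sections):
--         contains_del_add = any('del ' in line or 'add ' in line for line in section)
--         if not contains_del_add:
--             sections_to_remove.append(idx)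
--
--     for idx in reversed(sections_to_remove):
--         del sections[idx]
--
--     return sections
-- ===== SOURCE B (Python) =====
-- def check_changes(formatted_diff):
--     result = []
--     current = []
--     keep = False
--     for line in formatted_diff:
--         if line.startswith('@@'):
--             if keep:
--                 result.append(current)
--             current = []
--             keep = False
--         current.append(line)
--         if 'del ' in line or 'add ' in line:
--             keep = True
--     if keep:
--         result.append(current)
--     return result
-- ===== Notes on version B (the rewrite author's own statement) =====
-- stated objective: simpler
-- what changed: Replaces build-all-sections, then collect indices to remove, then delete-in-reverse with a single streaming pass that flushes each section as soon as the next '@@' (or the end) is reached and it contained a change.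
import Mathlib
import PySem

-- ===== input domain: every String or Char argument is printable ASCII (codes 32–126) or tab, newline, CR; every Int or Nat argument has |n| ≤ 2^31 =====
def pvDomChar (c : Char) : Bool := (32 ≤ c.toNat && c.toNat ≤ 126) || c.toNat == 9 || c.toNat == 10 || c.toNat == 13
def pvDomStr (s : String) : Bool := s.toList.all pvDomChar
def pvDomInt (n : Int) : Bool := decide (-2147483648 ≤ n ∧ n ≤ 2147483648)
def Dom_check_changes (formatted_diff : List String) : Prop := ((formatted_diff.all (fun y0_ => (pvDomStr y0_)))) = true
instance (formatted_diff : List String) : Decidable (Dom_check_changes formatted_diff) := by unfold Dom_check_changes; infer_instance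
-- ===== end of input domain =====

-- B replaces A's three phases (build all sections, collect indices of change-free sections, delete
-- them in reverse) by one streaming pass that flushes each finished section iff it held a change.

-- 'del ' in line or 'add ' in line  (the same expression occurs in both Pythons)
def pvHasChangeLine (line : String) : Bool :=
  PySem.Str.isIn "del " line || PySem.Str.isIn "add " line

-- ===== PORT A =====
-- loop 1: if line.startswith('@@'): i += 1; sections.append([]); then sections[i].append(line)
-- (sections[i] read with getD: i = len(sections) - 1 throughout, always in range)
def pvStepA (st : Nat × List (List String)) (line : String) : Nat × List (List String) :=
  let st' := if PySem.Str.startswith line "@@" then (st.1 + 1, st.2 ++ [[]]) else st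
  (st'.1, st'.2.set st'.1 ((st'.2.getD st'.1 []) ++ [line]))

def check_changes (formatted_diff : List String) : List (List String) :=
  let sections := (formatted_diff.foldl pvStepA (0, [[]])).2
  -- loop 2: for idx, sec in enumerate(sections): if not any('del ' in l or 'add ' in l for l in sec): sections_to_remove.append(idx)
  let sections_to_remove :=
    (sections.foldl
      (fun (st : Nat × List Nat) sec =>
        (st.1 + 1, if ¬ (sec.any pvHasChangeLine) = true then st.2 ++ [st.1] else st.2))
      (0, [])).2
  -- loop 3: for idx in reversed(sections_to_remove): del sections[idx]
  sections_to_remove.reverse.foldl (fun secs idx => secs.eraseIdx idx) sections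

-- ===== PORT B =====
def pvStepB (st : List (List String) × List String × Bool) (line : String) :
    List (List String) × List String × Bool :=
  let st' := if PySem.Str.startswith line "@@"
             then ((if st.2.2 then st.1 ++ [st.2.1] else st.1), ([] : List String), false)
             else st
  (st'.1, st'.2.1 ++ [line], st'.2.2 || pvHasChangeLine line)

def check_changes_alt (formatted_diff : List String) : List (List String) :=
  let st := formatted_diff.foldl pvStepB ([], [], false)
  if st.2.2 then st.1 ++ [st.2.1] else st.1

-- ===== PRECONDITION & SPEC =====
def Spec_check_changes (formatted_diff : List String) (out : List (List String)) : Prop := out = check_changes_alt formatted_diff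
instance (formatted_diff : List String) (out : List (List String)) : Decidable (Spec_check_changes formatted_diff out) := by unfold Spec_check_changes; infer_instance

-- ===== CLAIM (what is proved, stated in full; the proofs are below) =====
def Claim_equal_check_changes : Prop := ∀ (formatted_diff : List String), Dom_check_changes formatted_diff → Spec_check_changes formatted_diff (check_changes formatted_diff)

-- ===== LEMMAS AND PROOFS =====

-- reference: the list of sections a diff splits into, given the section built so far
def pvSplit : List String → List String → List (List String)
  | [], cur => [cur]
  | l :: ls, cur =>
    if PySem.Str.startswith l "@@" then cur :: pvSplit ls [l] else pvSplit ls (cur ++ [l])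

-- section contains a change
def pvHasChange (s : List String) : Bool := s.any pvHasChangeLine

theorem pv_getD_concat {α : Type} (done : List α) (cur d : α) :
    (done ++ [cur]).getD done.length d = cur := by
  simp [List.getD_eq_getElem?_getD]

theorem pv_set_concat {α : Type} (done : List α) (cur x : α) :
    (done ++ [cur]).set done.length x = done ++ [x] := by
  induction done with
  | nil => rfl
  | cons h t ih => simp [ih]

-- loop 1 of A builds exactly pvSplit
theorem pvA_build (lines : List String) : ∀ (done : List (List String)) (cur : List String),
    (lines.foldl pvStepA (done.length, done ++ [cur])).2 = done ++ pvSplit lines cur := by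
  induction lines with
  | nil => intro done cur; simp [pvSplit]
  | cons l ls ih =>
    intro done cur
    rw [List.foldl_cons]
    by_cases h : PySem.Str.startswith l "@@" = true
    · have e1 : pvStepA (done.length, done ++ [cur]) l
          = ((done ++ [cur]).length, (done ++ [cur]) ++ [[l]]) := by
        simp only [pvStepA]
        rw [if_pos h]
        dsimp only
        have hl : done.length + 1 = (done ++ [cur]).length := by simp
        rw [hl, pv_getD_concat, pv_set_concat]
        simp
      rw [e1, ih (done ++ [cur]) [l]]
      simp only [pvSplit]
      rw [if_pos h]
      simp
    · have e2 : pvStepA (done.length, done ++ [cur]) l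
          = (done.length, done ++ [cur ++ [l]]) := by
        simp only [pvStepA]
        rw [if_neg h]
        dsimp only
        rw [pv_getD_concat, pv_set_concat]
      rw [e2, ih done (cur ++ [l])]
      simp only [pvSplit]
      rw [if_neg h]

-- the index list collected by loop 2
def pvBadIdx : List (List String) → Nat → List Nat
  | [], _ => []
  | s :: t, k => (if pvHasChange s then [] else [k]) ++ pvBadIdx t (k + 1)

theorem pvA_collect (secs : List (List String)) : ∀ (k : Nat) (acc : List Nat),
    (secs.foldl
      (fun (st : Nat × List Nat) sec =>
        (st.1 + 1, if ¬ (sec.any pvHasChangeLine) = true then st.2 ++ [st.1] else st.2))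
      (k, acc)).2 = acc ++ pvBadIdx secs k := by
  induction secs with
  | nil => intro k acc; simp [pvBadIdx]
  | cons s t ih =>
    intro k acc
    rw [List.foldl_cons]
    dsimp only
    by_cases h : s.any pvHasChangeLine = true
    · rw [if_neg (by simp [h])]
      rw [ih (k + 1) acc]
      simp [pvBadIdx, pvHasChange, h]
    · rw [if_pos h]
      rw [ih (k + 1) (acc ++ [k])]
      simp [pvBadIdx, pvHasChange, h]

theorem pvBadIdx_succ (t : List (List String)) : ∀ (k : Nat),
    pvBadIdx t (k + 1) = (pvBadIdx t k).map Nat.succ := by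
  induction t with
  | nil => intro k; simp [pvBadIdx]
  | cons s t ih =>
    intro k
    by_cases h : pvHasChange s = true <;> simp [pvBadIdx, h, ih (k + 1), ih k]

-- erasing shifted indices leaves the head alone
theorem pv_foldl_erase_succ (idxs : List Nat) :
    ∀ (s : List String) (t : List (List String)),
    ((idxs.map Nat.succ).foldl (fun secs idx => secs.eraseIdx idx) (s :: t))
      = s :: idxs.foldl (fun secs idx => secs.eraseIdx idx) t := by
  induction idxs with
  | nil => intro s t; rfl
  | cons i is ih =>
    intro s t
    simp only [List.map_cons, List.foldl_cons, Nat.succ_eq_add_one, List.eraseIdx_cons_succ]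
    exact ih s _

-- loop 3 of A on the collected indices is a filter
theorem pvA_erase (secs : List (List String)) :
    (pvBadIdx secs 0).reverse.foldl (fun l i => l.eraseIdx i) secs
      = secs.filter pvHasChange := by
  induction secs with
  | nil => rfl
  | cons s t ih =>
    have hsucc : pvBadIdx t 1 = (pvBadIdx t 0).map Nat.succ := pvBadIdx_succ t 0
    by_cases h : pvHasChange s = true
    · simp only [pvBadIdx, h, if_pos, List.nil_append, hsucc]
      rw [← List.map_reverse, pv_foldl_erase_succ, ih]
      simp [List.filter, h]
    · simp only [pvBadIdx, h, if_neg, Bool.false_eq_true, not_false_iff, hsucc]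
      rw [show (([0] : List Nat) ++ (pvBadIdx t 0).map Nat.succ).reverse
          = ((pvBadIdx t 0).map Nat.succ).reverse ++ [0] by simp]
      rw [List.foldl_append, ← List.map_reverse, pv_foldl_erase_succ, ih]
      simp [List.filter, h]

-- the epilogue of B ('if keep: result.append(current)')
def pvFinishB (st : List (List String) × List String × Bool) : List (List String) :=
  if st.2.2 then st.1 ++ [st.2.1] else st.1

-- B's streaming fold computes the filter of pvSplit directly
theorem pvB_stream (lines : List String) : ∀ (res : List (List String)) (cur : List String),
    pvFinishB (lines.foldl pvStepB (res, cur, pvHasChange cur))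
      = res ++ (pvSplit lines cur).filter pvHasChange := by
  induction lines with
  | nil =>
    intro res cur
    by_cases h : pvHasChange cur = true <;> simp [pvFinishB, pvSplit, List.filter, h]
  | cons l ls ih =>
    intro res cur
    rw [List.foldl_cons]
    by_cases h : PySem.Str.startswith l "@@" = true
    · have hstep : pvStepB (res, cur, pvHasChange cur) l
          = ((if pvHasChange cur = true then res ++ [cur] else res), [l], pvHasChange [l]) := by
        simp only [pvStepB]
        rw [if_pos h]
        simp [pvHasChange]
      rw [hstep, ih _ [l]]
      simp only [pvSplit]
      rw [if_pos h]
      by_cases hc : pvHasChange cur = true <;> simp [List.filter, hc, List.append_assoc]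
    · have hstep : pvStepB (res, cur, pvHasChange cur) l
          = (res, cur ++ [l], pvHasChange (cur ++ [l])) := by
        simp only [pvStepB]
        rw [if_neg h]
        simp [pvHasChange]
      rw [hstep, ih res (cur ++ [l])]
      simp only [pvSplit]
      rw [if_neg h]

theorem pvA_eq (fd : List String) :
    check_changes fd = (pvSplit fd []).filter pvHasChange := by
  unfold check_changes
  have h1 : (fd.foldl pvStepA (0, [[]])).2 = pvSplit fd [] := by
    have h := pvA_build fd [] []
    simpa using h
  have h2 := pvA_collect (pvSplit fd []) 0 []
  simp only [List.nil_append] at h2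
  simp only [h1, h2, pvA_erase]

theorem pvB_eq (fd : List String) :
    check_changes_alt fd = (pvSplit fd []).filter pvHasChange := by
  have h := pvB_stream fd [] []
  simpa [check_changes_alt, pvFinishB, pvHasChange] using h

-- ===== VERDICT (by name: the statement is the Claim_ definition above) =====
theorem check_changes_spec : Claim_equal_check_changes := by
  intro formatted_diff _
  unfold Spec_check_changes
  rw [pvA_eq, pvB_eq]
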